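-- pv_equiv track=rewrite | github.com/EyasuTesfu/Competitive-Programming | 1923-sentence-similarity-iii/1923-sentence-similarity-iii.py | areSentencesSimilar
-- ===== SOURCE A (Python) =====
-- def areSentencesSimilar(sentence1: str, sentence2: str) -> bool:
--     # s1, let's consider we always add to sentence 1
--     # where can we add it:
--     # start A s1, es1 == es2, where e == end
--     # middle ss1 A ss1 => ss1 == ss2 A= ms2 es1 == es2, one has extra field at the middle
--     # end s1 A, => ss1 == ss2
--     # if they're not similar at the star, then check their end, if that's not the same then it won't work.
--     # if we have similarity and one length ends we return True
--     # if we have similarity then difference we move while trying to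
--     # similarity then difference could be dealt with
--
--     s1 = sentence1.split(' ')
--     s2 = sentence2.split(' ')
--     l1 = l2 = 0
--     r1 = len(s1) - 1
--     r2 = len(s2) - 1
--     # not similar at the start
--     if s1[l1] != s2[l2]:
--         if s1[r1] != s2[r2]:
--             return False
--         min_length = min(len(s1), len(s2))
--         # max_length = max(len(s1), len(s2))
--         return s1[:min_length] == s2[len(s2)-min_length:] or s1[len(s1) - min_length:] == s2[:min_length]
--     else:
--         min_length = min(len(s1), len(s2))
--         if s1[:min_length] == s2[:min_length]:
--             return True
--         else:
--             while l1 <= r1 and l2 <= r2: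
--                 if s1[l1] != s2[l2]:
--                     break
--                 l1 += 1
--                 l2 += 1
--             if l1 > r1 or l2 > r2:
--                 return True
--             return s1[l1:] == s2[len(s2)-len(s1[l1:]):] or s2[l2:] == s1[len(s1) - len(s2[l2:]):]
--     return False
-- ===== SOURCE B (Python) =====
-- def areSentencesSimilar(sentence1: str, sentence2: str) -> bool:
--     w1 = sentence1.split(' ')
--     w2 = sentence2.split(' ')
--     i = 0
--     while i < len(w1) and i < len(w2) and w1[i] == w2[i]:
--         i += 1
--     j = 0
--     while j < len(w1) - i and j < len(w2) - i and w1[len(w1) - 1 - j] == w2[len(w2) - 1 - j]: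
--         j += 1
--     return i + j >= min(len(w1), len(w2))
-- ===== Notes on version B (the rewrite author's own statement) =====
-- stated objective: simpler
-- what changed: A's four-way branching on first/last words with slice comparisons and a mid-sentence while loop is replaced by two plain counting passes (shared-prefix length, then shared-suffix length capped at len-i) and the single test i + j >= min(len(w1), len(w2)).
import Mathlib
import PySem

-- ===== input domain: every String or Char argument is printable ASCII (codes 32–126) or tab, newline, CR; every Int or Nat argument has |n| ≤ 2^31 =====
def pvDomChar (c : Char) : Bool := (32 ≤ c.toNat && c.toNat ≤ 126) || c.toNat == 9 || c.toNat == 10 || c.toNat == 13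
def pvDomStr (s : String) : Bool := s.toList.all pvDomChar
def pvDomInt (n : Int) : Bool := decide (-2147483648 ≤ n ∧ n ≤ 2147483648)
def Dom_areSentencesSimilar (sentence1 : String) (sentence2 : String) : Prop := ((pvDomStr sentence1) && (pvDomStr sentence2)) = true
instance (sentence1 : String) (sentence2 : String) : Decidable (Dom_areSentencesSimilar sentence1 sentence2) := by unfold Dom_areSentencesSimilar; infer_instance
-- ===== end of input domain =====

-- B replaces A's four-way branch on first/last words, slice comparisons and mid-sentence while loop
-- by two plain counting passes (shared prefix length, then shared suffix length capped to avoid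
-- double counting) and one comparison: objective 'simpler'.

-- ===== PORT A =====
-- A's while loop: l1 and l2 always advance together, so a single counter l is the exact state;
-- the loop breaks on the first mismatch.  Indices l ≤ r1, l ≤ r2 are always in range.
def pvLoopA (s1 s2 : List String) (r1 r2 l : Int) : Int :=
  if l ≤ r1 ∧ l ≤ r2 then
    if PySem.List.pyGet? s1 l ≠ PySem.List.pyGet? s2 l then l
    else pvLoopA s1 s2 r1 r2 (l + 1)
  else l
termination_by (r1 + 1 - l).toNat
decreasing_by omega

-- A's body after the split.  s1[0], s1[r1] etc. are ported with pyGet? (Option equality);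
-- split(' ') always yields a nonempty list, so the IndexError case (pyGet? = none) is unreachable.
def pvCoreA (s1 s2 : List String) : Bool :=
  let n : Int := s1.length
  let m : Int := s2.length
  let r1 : Int := n - 1
  let r2 : Int := m - 1
  if PySem.List.pyGet? s1 0 ≠ PySem.List.pyGet? s2 0 then
    if PySem.List.pyGet? s1 r1 ≠ PySem.List.pyGet? s2 r2 then false
    else
      let minLength : Int := min n m
      decide (PySem.List.slice s1 none (some minLength) = PySem.List.slice s2 (some (m - minLength)) none
        ∨ PySem.List.slice s1 (some (n - minLength)) none = PySem.List.slice s2 none (some minLength))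
  else
    let minLength : Int := min n m
    if PySem.List.slice s1 none (some minLength) = PySem.List.slice s2 none (some minLength) then true
    else
      let l := pvLoopA s1 s2 r1 r2 0
      if l > r1 ∨ l > r2 then true
      else
        decide (PySem.List.slice s1 (some l) none
            = PySem.List.slice s2 (some (m - ((PySem.List.slice s1 (some l) none).length : Int))) none
          ∨ PySem.List.slice s2 (some l) none
            = PySem.List.slice s1 (some (n - ((PySem.List.slice s2 (some l) none).length : Int))) none)

def areSentencesSimilar (sentence1 : String) (sentence2 : String) : Bool :=
  pvCoreA ((PySem.Str.split? sentence1 " ").getD []) ((PySem.Str.split? sentence2 " ").getD [])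

-- ===== PORT B =====
-- first pass of Source B: count matching words from the front
def pvPrefLoop (w1 w2 : List String) (i : Nat) : Nat :=
  if h : i < w1.length ∧ i < w2.length then
    if w1[i]'h.1 = w2[i]'h.2 then pvPrefLoop w1 w2 (i + 1) else i
  else i
termination_by w1.length - i

-- second pass of Source B: count matching words from the back, capped at len - i on both sides
def pvSufLoop (w1 w2 : List String) (i j : Nat) : Nat :=
  if h : j < w1.length - i ∧ j < w2.length - i then
    if w1[w1.length - 1 - j]'(by omega) = w2[w2.length - 1 - j]'(by omega) then
      pvSufLoop w1 w2 i (j + 1)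
    else j
  else j
termination_by w1.length - i - j

def pvCoreB (w1 w2 : List String) : Bool :=
  let i := pvPrefLoop w1 w2 0
  let j := pvSufLoop w1 w2 i 0
  decide (min w1.length w2.length ≤ i + j)

def areSentencesSimilar_alt (sentence1 : String) (sentence2 : String) : Bool :=
  pvCoreB ((PySem.Str.split? sentence1 " ").getD []) ((PySem.Str.split? sentence2 " ").getD [])

-- ===== PRECONDITION & SPEC =====
def Spec_areSentencesSimilar (sentence1 : String) (sentence2 : String) (out : Bool) : Prop := out = areSentencesSimilar_alt sentence1 sentence2
instance (sentence1 : String) (sentence2 : String) (out : Bool) : Decidable (Spec_areSentencesSimilar sentence1 sentence2 out) := by unfold Spec_areSentencesSimilar; infer_instance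

-- ===== CLAIM (what is proved, stated in full; the proofs are below) =====
def Claim_equal_areSentencesSimilar : Prop := ∀ (sentence1 : String) (sentence2 : String), Dom_areSentencesSimilar sentence1 sentence2 → Spec_areSentencesSimilar sentence1 sentence2 (areSentencesSimilar sentence1 sentence2)

-- ===== LEMMAS AND PROOFS =====

-- longest common prefix length of two word lists
def pvPref : List String → List String → Nat
  | a :: as, b :: bs => if a = b then pvPref as bs + 1 else 0
  | _, _ => 0

-- longest common suffix length
def pvSuff (x y : List String) : Nat := pvPref x.reverse y.reverse

lemma pvPref_nil_left (y : List String) : pvPref [] y = 0 := by cases y <;> rfl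

lemma pvPref_nil_right (x : List String) : pvPref x [] = 0 := by cases x <;> rfl

lemma pvPref_cons (a b : String) (as bs : List String) :
    pvPref (a :: as) (b :: bs) = if a = b then pvPref as bs + 1 else 0 := rfl

lemma pvPref_le_left (x y : List String) : pvPref x y ≤ x.length := by
  induction x generalizing y with
  | nil => simp [pvPref_nil_left]
  | cons a as ih =>
    cases y with
    | nil => simp [pvPref_nil_right]
    | cons b bs =>
      rw [pvPref_cons]
      split
      · simpa using ih bs
      · simp

lemma pvPref_le_right (x y : List String) : pvPref x y ≤ y.length := by
  induction x generalizing y with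
  | nil => simp [pvPref_nil_left]
  | cons a as ih =>
    cases y with
    | nil => simp [pvPref_nil_right]
    | cons b bs =>
      rw [pvPref_cons]
      split
      · simpa using ih bs
      · simp

lemma pvSuff_le_left (x y : List String) : pvSuff x y ≤ x.length := by
  simpa [pvSuff] using pvPref_le_left x.reverse y.reverse

lemma pvSuff_le_right (x y : List String) : pvSuff x y ≤ y.length := by
  simpa [pvSuff] using pvPref_le_right x.reverse y.reverse

-- the prefix characterisation of take-equality
lemma pvTake_eq_iff (x y : List String) (k : Nat) (hk1 : k ≤ x.length) (hk2 : k ≤ y.length) :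
    (x.take k = y.take k ↔ k ≤ pvPref x y) := by
  induction x generalizing y k with
  | nil =>
    simp at hk1
    subst hk1; simp
  | cons a as ih =>
    cases y with
    | nil =>
      simp at hk2
      subst hk2; simp
    | cons b bs =>
      cases k with
      | zero => simp
      | succ k =>
        simp only [List.take_succ_cons, List.cons.injEq, pvPref_cons]
        by_cases hab : a = b
        · subst hab
          rw [if_pos rfl]
          simp only [true_and]
          rw [ih bs k (by simpa using hk1) (by simpa using hk2)]
          omega
        · simp [hab]

-- pvPref at an in-range index: step rule through drop
lemma pvPref_drop_step (x y : List String) (i : Nat) (h1 : i < x.length) (h2 : i < y.length) :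
    pvPref (x.drop i) (y.drop i)
      = if x[i] = y[i] then pvPref (x.drop (i + 1)) (y.drop (i + 1)) + 1 else 0 := by
  rw [List.drop_eq_getElem_cons h1, List.drop_eq_getElem_cons h2, pvPref_cons]

lemma pvPref_drop_oob (x y : List String) (i : Nat) (h : x.length ≤ i ∨ y.length ≤ i) :
    pvPref (x.drop i) (y.drop i) = 0 := by
  rcases h with h | h
  · rw [List.drop_eq_nil_of_le h, pvPref_nil_left]
  · rw [List.drop_eq_nil_of_le h, pvPref_nil_right]

-- B's first loop computes the common prefix length
lemma pvPrefLoop_eq (x y : List String) (i : Nat) :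
    pvPrefLoop x y i = i + pvPref (x.drop i) (y.drop i) := by
  unfold pvPrefLoop
  split
  · rename_i h
    rw [pvPref_drop_step x y i h.1 h.2]
    split
    · rw [pvPrefLoop_eq x y (i + 1)]; omega
    · omega
  · rename_i h
    rw [pvPref_drop_oob x y i (by omega)]
    omega
termination_by x.length - i

-- B's second loop computes the common suffix length capped at min(len-i)
lemma pvSufLoop_eq (x y : List String) (i j : Nat) (hj : j ≤ min (x.length - i) (y.length - i)) :
    pvSufLoop x y i j
      = min (j + pvPref (x.reverse.drop j) (y.reverse.drop j)) (min (x.length - i) (y.length - i)) := by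
  unfold pvSufLoop
  split
  · rename_i h
    have hx : j < x.length := by omega
    have hy : j < y.length := by omega
    have e1 : x[x.length - 1 - j]'(by omega) = x.reverse[j]'(by simpa using hx) :=
      (List.getElem_reverse _).symm
    have e2 : y[y.length - 1 - j]'(by omega) = y.reverse[j]'(by simpa using hy) :=
      (List.getElem_reverse _).symm
    rw [pvPref_drop_step x.reverse y.reverse j (by simpa using hx) (by simpa using hy)]
    split
    · rename_i heq
      rw [pvSufLoop_eq x y i (j + 1) (by omega)]
      rw [if_pos (by rw [← e1, ← e2]; exact heq)]
      omega
    · rename_i hne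
      rw [if_neg (by rw [e1, e2] at hne; exact hne)]
      omega
  · rename_i h
    have : j = min (x.length - i) (y.length - i) := by omega
    omega
termination_by x.length - i - j

-- A's while loop computes the same prefix length (Int clothing)
lemma pvLoopA_eq (x y : List String) (i : Nat) :
    pvLoopA x y ((x.length : Int) - 1) ((y.length : Int) - 1) i
      = (i : Int) + pvPref (x.drop i) (y.drop i) := by
  unfold pvLoopA
  by_cases h : (i : Int) ≤ (x.length : Int) - 1 ∧ (i : Int) ≤ (y.length : Int) - 1
  · have h1 : i < x.length := by omega
    have h2 : i < y.length := by omega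
    rw [if_pos h]
    have g1 : PySem.List.pyGet? x (i : Int) = some (x[i]'h1) := by
      rw [PySem.List.pyGet?_natCast, List.getElem?_eq_getElem h1]
    have g2 : PySem.List.pyGet? y (i : Int) = some (y[i]'h2) := by
      rw [PySem.List.pyGet?_natCast, List.getElem?_eq_getElem h2]
    rw [pvPref_drop_step x y i h1 h2]
    by_cases heq : x[i]'h1 = y[i]'h2
    · rw [if_neg (by simp [g1, g2, heq]), if_pos heq]
      have : ((i : Int) + 1) = ((i + 1 : Nat) : Int) := by omega
      rw [this, pvLoopA_eq x y (i + 1)]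
      omega
    · rw [if_pos (by simp [g1, g2]; exact heq), if_neg heq]
      omega
  · rw [if_neg h]
    rw [pvPref_drop_oob x y i (by omega)]
    omega
termination_by x.length - i

-- suffix characterisation of the aligned drop-equality
lemma pvDrop_eq_iff (x y : List String) (l : Nat) (_hl : l ≤ x.length)
    (hm : x.length - l ≤ y.length) :
    (x.drop l = y.drop (y.length - (x.length - l)) ↔ x.length - l ≤ pvSuff x y) := by
  have hrev : x.drop l = y.drop (y.length - (x.length - l))
      ↔ (x.drop l).reverse = (y.drop (y.length - (x.length - l))).reverse := by
    constructor
    · intro h; rw [h]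
    · intro h; exact List.reverse_injective h
  rw [hrev, List.reverse_drop, List.reverse_drop]
  have e2 : y.length - (y.length - (x.length - l)) = x.length - l := by omega
  rw [e2]
  exact pvTake_eq_iff x.reverse y.reverse (x.length - l) (by simp) (by simpa using hm)

-- B's core, characterised
lemma pvCoreB_char (x y : List String) :
    pvCoreB x y = decide (min x.length y.length ≤ pvPref x y + pvSuff x y) := by
  have hp1 := pvPref_le_left x y
  have hp2 := pvPref_le_right x y
  have hs1 := pvSuff_le_left x y
  have hs2 := pvSuff_le_right x y
  unfold pvCoreB
  rw [pvPrefLoop_eq x y 0]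
  simp only [List.drop_zero, Nat.zero_add]
  rw [pvSufLoop_eq x y (pvPref x y) 0 (by omega)]
  simp only [List.drop_zero, Nat.zero_add]
  have : pvPref x.reverse y.reverse = pvSuff x y := rfl
  rw [this]
  simp only [decide_eq_decide]
  omega

lemma pvPref_comm : ∀ (x y : List String), pvPref x y = pvPref y x
  | [], y => by rw [pvPref_nil_left, pvPref_nil_right]
  | a :: as, [] => by rw [pvPref_nil_left, pvPref_nil_right]
  | a :: as, b :: bs => by
    rw [pvPref_cons, pvPref_cons, pvPref_comm as bs]
    by_cases h : a = b
    · rw [if_pos h, if_pos h.symm]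
    · rw [if_neg h, if_neg (fun hba => h hba.symm)]

lemma pvSuff_comm (x y : List String) : pvSuff x y = pvSuff y x := pvPref_comm _ _

-- A's core, characterised (nonempty word lists)
lemma pvCoreA_char (x y : List String) (hx : x ≠ []) (hy : y ≠ []) :
    pvCoreA x y = decide (min x.length y.length ≤ pvPref x y + pvSuff x y) := by
  have hn : 0 < x.length := List.length_pos_iff.mpr hx
  have hm : 0 < y.length := List.length_pos_iff.mpr hy
  have hp1 := pvPref_le_left x y
  have hp2 := pvPref_le_right x y
  have hs1 := pvSuff_le_left x y
  have hs2 := pvSuff_le_right x y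
  have g10 : PySem.List.pyGet? x 0 = some (x[0]'hn) := by
    rw [PySem.List.pyGet?_zero, List.getElem?_eq_getElem hn]
  have g20 : PySem.List.pyGet? y 0 = some (y[0]'hm) := by
    rw [PySem.List.pyGet?_zero, List.getElem?_eq_getElem hm]
  have c1 : (x.length : Int) - 1 = ((x.length - 1 : Nat) : Int) := by omega
  have c2 : (y.length : Int) - 1 = ((y.length - 1 : Nat) : Int) := by omega
  have g1l : PySem.List.pyGet? x ((x.length : Int) - 1) = some (x[x.length - 1]'(by omega)) := by
    rw [c1, PySem.List.pyGet?_natCast, List.getElem?_eq_getElem (by omega)]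
  have g2l : PySem.List.pyGet? y ((y.length : Int) - 1) = some (y[y.length - 1]'(by omega)) := by
    rw [c2, PySem.List.pyGet?_natCast, List.getElem?_eq_getElem (by omega)]
  have hrx : 0 < x.reverse.length := by simpa using hn
  have hry : 0 < y.reverse.length := by simpa using hm
  have er1 : x.reverse[0]'hrx = x[x.length - 1]'(by omega) := by
    rw [List.getElem_reverse]; simp
  have er2 : y.reverse[0]'hry = y[y.length - 1]'(by omega) := by
    rw [List.getElem_reverse]; simp
  have hsuff0 : pvSuff x y
      = if x[x.length - 1]'(by omega) = y[y.length - 1]'(by omega)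
        then pvPref (x.reverse.drop 1) (y.reverse.drop 1) + 1 else 0 := by
    have h0 := pvPref_drop_step x.reverse y.reverse 0 hrx hry
    simp only [List.drop_zero, Nat.zero_add] at h0
    rw [er1, er2] at h0
    simpa [pvSuff] using h0
  have hpref0 : pvPref x y
      = if x[0]'hn = y[0]'hm then pvPref (x.drop 1) (y.drop 1) + 1 else 0 := by
    have h0 := pvPref_drop_step x y 0 hn hm
    simpa using h0
  have cmin : (min (x.length : Int) (y.length : Int)) = ((min x.length y.length : Nat) : Int) := by
    omega
  simp only [pvCoreA]
  rw [g10, g20, g1l, g2l, cmin]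
  by_cases hhead : x[0]'hn = y[0]'hm
  · -- first words equal
    rw [if_neg (by simp [hhead])]
    rw [PySem.List.slice_to_natCast, PySem.List.slice_to_natCast]
    have htk := pvTake_eq_iff x y (min x.length y.length) (min_le_left _ _) (min_le_right _ _)
    by_cases hminp : min x.length y.length ≤ pvPref x y
    · rw [if_pos (htk.mpr hminp)]
      symm
      simp only [decide_eq_true_eq]
      omega
    · rw [if_neg (fun h => hminp (htk.mp h))]
      have hl : pvLoopA x y ((x.length : Int) - 1) ((y.length : Int) - 1) 0
          = ((pvPref x y : Nat) : Int) := by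
        simpa using pvLoopA_eq x y 0
      rw [hl]
      rw [if_neg (by omega)]
      rw [PySem.List.slice_from_natCast, PySem.List.slice_from_natCast,
        List.length_drop, List.length_drop]
      have d1iff : (x.drop (pvPref x y)
            = PySem.List.slice y (some ((y.length : Int) - ((x.length - pvPref x y : Nat) : Int))) none)
          ↔ (x.length - pvPref x y ≤ pvSuff x y) := by
        by_cases hc1 : x.length - pvPref x y ≤ y.length
        · have cc : (y.length : Int) - ((x.length - pvPref x y : Nat) : Int)
              = ((y.length - (x.length - pvPref x y) : Nat) : Int) := by omega
          rw [cc, PySem.List.slice_from_natCast]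
          exact pvDrop_eq_iff x y (pvPref x y) (by omega) hc1
        · constructor
          · intro h
            have hlen := congrArg List.length h
            rw [PySem.List.slice_some_none, List.length_drop, List.length_drop] at hlen
            have hcl := PySem.List.clampIdx_le y.length ((y.length : Int) - ((x.length - pvPref x y : Nat) : Int))
            omega
          · intro h; exfalso; omega
      have d2iff : (y.drop (pvPref x y)
            = PySem.List.slice x (some ((x.length : Int) - ((y.length - pvPref x y : Nat) : Int))) none)
          ↔ (y.length - pvPref x y ≤ pvSuff x y) := by
        by_cases hc2 : y.length - pvPref x y ≤ x.length
        · have cc : (x.length : Int) - ((y.length - pvPref x y : Nat) : Int)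
              = ((x.length - (y.length - pvPref x y) : Nat) : Int) := by omega
          rw [cc, PySem.List.slice_from_natCast]
          rw [pvDrop_eq_iff y x (pvPref x y) (by omega) hc2, pvSuff_comm]
        · constructor
          · intro h
            have hlen := congrArg List.length h
            rw [PySem.List.slice_some_none, List.length_drop, List.length_drop] at hlen
            have hcl := PySem.List.clampIdx_le x.length ((x.length : Int) - ((y.length - pvPref x y : Nat) : Int))
            omega
          · intro h; exfalso; omega
      rw [decide_eq_decide, d1iff, d2iff]
      omega
  · -- first words differ
    have hp0 : pvPref x y = 0 := by rw [hpref0, if_neg hhead]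
    rw [if_pos (by simpa using hhead)]
    by_cases hlast : x[x.length - 1]'(by omega) = y[y.length - 1]'(by omega)
    · -- last words equal
      rw [if_neg (by simp [hlast])]
      rw [PySem.List.slice_to_natCast, PySem.List.slice_to_natCast]
      have cd1 : (y.length : Int) - ((min x.length y.length : Nat) : Int)
          = ((y.length - min x.length y.length : Nat) : Int) := by omega
      have cd2 : (x.length : Int) - ((min x.length y.length : Nat) : Int)
          = ((x.length - min x.length y.length : Nat) : Int) := by omega
      rw [cd1, cd2, PySem.List.slice_from_natCast, PySem.List.slice_from_natCast,
        decide_eq_decide]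
      by_cases hnm : x.length ≤ y.length
      · have hmn : min x.length y.length = x.length := min_eq_left hnm
        rw [hmn]
        have d1iff : (x.take x.length = y.drop (y.length - x.length))
            ↔ (x.length ≤ pvSuff x y) := by
          have h0 := pvDrop_eq_iff x y 0 (by omega) (by simpa using hnm)
          simp only [List.drop_zero, Nat.sub_zero] at h0
          rw [List.take_length]
          exact h0
        have d2false : ¬ (x.drop (x.length - x.length) = y.take x.length) := by
          intro h
          rw [Nat.sub_self, List.drop_zero] at h
          have hteq : x.take x.length = y.take x.length := by
            conv_lhs => rw [List.take_length, h]
          rw [pvTake_eq_iff x y x.length le_rfl hnm] at hteq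
          omega
        constructor
        · rintro (h | h)
          · have := d1iff.mp h; omega
          · exact absurd h d2false
        · intro h
          exact Or.inl (d1iff.mpr (by omega))
      · have hmn : min x.length y.length = y.length := min_eq_right (by omega)
        rw [hmn]
        have d2iff : (x.drop (x.length - y.length) = y.take y.length)
            ↔ (y.length ≤ pvSuff x y) := by
          have h0 := pvDrop_eq_iff y x 0 (by omega) (by omega)
          simp only [List.drop_zero, Nat.sub_zero] at h0
          rw [List.take_length, eq_comm, h0, pvSuff_comm y x]
        have d1false : ¬ (x.take y.length = y.drop (y.length - y.length)) := by
          intro h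
          rw [Nat.sub_self, List.drop_zero] at h
          have hteq : x.take y.length = y.take y.length := by
            rw [h, List.take_length]
          rw [pvTake_eq_iff x y y.length (by omega) le_rfl] at hteq
          omega
        constructor
        · rintro (h | h)
          · exact absurd h d1false
          · have := d2iff.mp h; omega
        · intro h
          exact Or.inr (d2iff.mpr (by omega))
    · -- last words differ: A returns False
      have hs0 : pvSuff x y = 0 := by rw [hsuff0, if_neg hlast]
      rw [if_pos (by simpa using hlast)]
      symm
      simp only [decide_eq_false_iff_not]
      omega

-- every splitOn.go call returns a strictly longer list than its accumulator
lemma pvGo_len (sep : List Char) (fuel : Nat) : ∀ (l cur : List Char) (acc : List (List Char)),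
    acc.length < (PySem.Chars.splitOn.go sep fuel l cur acc).length := by
  induction fuel with
  | zero =>
    intro l cur acc
    rw [PySem.Chars.splitOn.go.eq_def]
    simp
  | succ f ih =>
    intro l cur acc
    rw [PySem.Chars.splitOn.go.eq_def]
    cases l with
    | nil => simp
    | cons c rest =>
      dsimp only
      split
      · have := ih (List.drop sep.length (c :: rest)) [] (cur.reverse :: acc)
        simp only [List.length_cons] at this ⊢
        omega
      · exact ih rest (c :: cur) acc

lemma pvSplit_ne_nil (s : String) : (PySem.Str.split? s " ").getD [] ≠ [] := by
  have h : PySem.Str.split? s " "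
      = some ((PySem.Chars.splitOn s.toList [' ']).map String.ofList) := by
    simp [PySem.Str.split?, PySem.Chars.split?]
  rw [h, Option.getD_some]
  intro hnil
  rw [List.map_eq_nil_iff] at hnil
  have hlen := pvGo_len [' '] (s.toList.length + 1) s.toList [] []
  rw [show PySem.Chars.splitOn s.toList [' ']
        = PySem.Chars.splitOn.go [' '] (s.toList.length + 1) s.toList [] [] from rfl] at hnil
  rw [hnil] at hlen
  simp at hlen

-- ===== VERDICT (by name: the statement is the Claim_ definition above) =====
theorem areSentencesSimilar_spec : Claim_equal_areSentencesSimilar := by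
  intro s1 s2 _
  unfold Spec_areSentencesSimilar areSentencesSimilar areSentencesSimilar_alt
  rw [pvCoreA_char _ _ (pvSplit_ne_nil s1) (pvSplit_ne_nil s2), pvCoreB_char]
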